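-- pv_equiv track=rewrite | github.com/Yara-Abdallah/Life-Event-EXtraction | main.py | get_sayers_of_all_dialogs
-- ===== SOURCE A (Python) =====
-- def get_sayers_of_all_dialogs(sayers):
--     sayers_of_all_dialogs = []
--     sy = []
--     for i in sayers:
--         if i != "":
--             sy.append(i)
--         if i == "" and len(sy) != 0:
--             sayers_of_all_dialogs.append(sy)
--             sy = []
--     return sayers_of_all_dialogs
-- ===== SOURCE B (Python) =====
-- def get_sayers_of_all_dialogs(sayers):
--     delim_positions = [i for i, s in enumerate(sayers) if s == ""]
--     result = []
--     start = 0
--     for d in delim_positions: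
--         group = sayers[start:d]
--         if group:
--             result.append(group)
--         start = d + 1
--     return result
-- ===== Notes on version B (the rewrite author's own statement) =====
-- stated objective: alternative
-- what changed: Instead of accumulating a running group element-by-element with flush-on-delimiter state, B first collects the indices of the empty-string delimiters and then slices the list between consecutive delimiters, keeping non-empty slices; a trailing non-delimited group is dropped in both.
import Mathlib
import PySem

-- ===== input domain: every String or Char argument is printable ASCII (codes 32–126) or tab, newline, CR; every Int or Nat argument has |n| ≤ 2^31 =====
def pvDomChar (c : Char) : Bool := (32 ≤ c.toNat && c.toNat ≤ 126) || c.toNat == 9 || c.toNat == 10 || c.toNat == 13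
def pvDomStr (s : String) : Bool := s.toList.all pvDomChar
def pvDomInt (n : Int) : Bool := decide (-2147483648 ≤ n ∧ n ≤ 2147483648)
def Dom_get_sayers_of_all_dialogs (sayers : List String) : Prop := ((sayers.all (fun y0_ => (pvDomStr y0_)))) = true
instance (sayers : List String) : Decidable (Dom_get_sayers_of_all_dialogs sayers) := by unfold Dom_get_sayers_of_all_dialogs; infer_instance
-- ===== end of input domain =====

-- B collects the delimiter indices first and slices between them (instead of A's running-group
-- accumulator with flush-on-delimiter); same values, alternative decomposition.

-- ===== PORT A =====
-- the body of A's for-loop; state = (sayers_of_all_dialogs, sy), both ifs in order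
def pvStepA (st : List (List String) × List String) (i : String) :
    List (List String) × List String :=
  let sy := if i ≠ "" then st.2 ++ [i] else st.2
  if i = "" ∧ sy ≠ [] then (st.1 ++ [sy], []) else (st.1, sy)

def get_sayers_of_all_dialogs (sayers : List String) : List (List String) :=
  (sayers.foldl pvStepA ([], [])).1

-- ===== PORT B =====
-- [i for i, s in enumerate(sayers) if s == ""]
def pvDelims (sayers : List String) : List Int :=
  ((PySem.List.enumerate sayers).filter (fun p => p.2 == "")).map (·.1)

-- the 'for d in delim_positions' loop of Source B, carrying (result, start)
def pvGroups : List Int → Int → List (List String) → List String → List (List String)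
  | [], _, result, _ => result
  | d :: ds, start, result, sayers =>
    let group := PySem.List.slice sayers (some start) (some d)
    pvGroups ds (d + 1) (if group ≠ [] then result ++ [group] else result) sayers

def get_sayers_of_all_dialogs_alt (sayers : List String) : List (List String) :=
  pvGroups (pvDelims sayers) 0 [] sayers

-- ===== PRECONDITION & SPEC =====
def Spec_get_sayers_of_all_dialogs (sayers : List String) (out : List (List String)) : Prop := out = get_sayers_of_all_dialogs_alt sayers
instance (sayers : List String) (out : List (List String)) : Decidable (Spec_get_sayers_of_all_dialogs sayers out) := by unfold Spec_get_sayers_of_all_dialogs; infer_instance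

-- ===== CLAIM (what is proved, stated in full; the proofs are below) =====
def Claim_equal_get_sayers_of_all_dialogs : Prop := ∀ (sayers : List String), Dom_get_sayers_of_all_dialogs sayers → Spec_get_sayers_of_all_dialogs sayers (get_sayers_of_all_dialogs sayers)

-- ===== LEMMAS AND PROOFS =====

-- common reference function: the groups of l, with pending (not yet flushed) group sy
def pvF : List String → List String → List (List String)
  | _, [] => []
  | sy, x :: xs =>
    if x = "" then (if sy = [] then [] else [sy]) ++ pvF [] xs else pvF (sy ++ [x]) xs

-- A's loop in terms of pvF
theorem pvA_loop (l : List String) (acc : List (List String)) (sy : List String) :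
    (l.foldl pvStepA (acc, sy)).1 = acc ++ pvF sy l := by
  induction l generalizing acc sy with
  | nil => simp [pvF]
  | cons x xs ih =>
    rw [List.foldl_cons]
    by_cases hx : x = ""
    · subst hx
      by_cases hsy : sy = []
      · rw [show pvStepA (acc, sy) "" = (acc, sy) by simp [pvStepA, hsy], ih]
        simp [pvF, hsy]
      · rw [show pvStepA (acc, sy) "" = (acc ++ [sy], []) by simp [pvStepA, hsy], ih]
        simp [pvF, hsy]
    · rw [show pvStepA (acc, sy) x = (acc, sy ++ [x]) by simp [pvStepA, hx], ih]
      simp [pvF, hx]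

-- delimiter indices, Nat version
def pvDN : List String → List Nat
  | [] => []
  | x :: xs => (if x = "" then [0] else []) ++ (pvDN xs).map (· + 1)

theorem pvDelims_eq (l : List String) (s : Int) :
    ((PySem.List.enumerate l s).filter (fun p => p.2 == "")).map (·.1)
      = (pvDN l).map (fun (n : Nat) => ((n : Int) + s)) := by
  induction l generalizing s with
  | nil => simp [PySem.List.enumerate_nil, pvDN]
  | cons x xs ih =>
    rw [PySem.List.enumerate_cons, List.filter_cons]
    by_cases hx : x = ""
    · subst hx
      rw [if_pos (by simp), List.map_cons, ih (s + 1)]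
      simp only [pvDN, List.cons_append, List.nil_append, List.map_cons, List.map_map, if_true]
      rw [List.cons_eq_cons]
      refine ⟨by norm_num, List.map_congr_left fun n _ => ?_⟩
      simp only [Function.comp]
      push_cast
      ring
    · rw [if_neg (by simp [hx]), ih (s + 1)]
      simp only [pvDN, if_neg hx, List.nil_append, List.map_map]
      refine List.map_congr_left fun n _ => ?_
      simp only [Function.comp]
      push_cast
      ring

-- B's loop, Nat version with drop/take slices
def pvGN : List Nat → Nat → List (List String) → List String → List (List String)
  | [], _, result, _ => result
  | d :: ds, start, result, sayers =>
    let group := (sayers.drop start).take (d - start)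
    pvGN ds (d + 1) (if group ≠ [] then result ++ [group] else result) sayers

theorem pvGroups_eq_pvGN (ds : List Nat) (start : Nat) (res : List (List String)) (l : List String) :
    pvGroups (ds.map (Nat.cast : Nat → Int)) ((start : Nat) : Int) res l = pvGN ds start res l := by
  induction ds generalizing start res with
  | nil => simp [pvGroups, pvGN]
  | cons d ds ih =>
    rw [List.map_cons]
    show pvGroups _ _ _ _ = _
    rw [pvGroups, pvGN]
    simp only [PySem.List.slice_natCast]
    rw [show ((d : Int) + 1) = (((d + 1 : Nat) : Nat) : Int) by push_cast; ring, ih]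

-- shifting the delimiter indices and the start past a prefix of length s
theorem pvGN_shift (ds : List Nat) (c s : Nat) (res : List (List String)) (t l : List String)
    (ht : t.length = s) :
    pvGN (ds.map (· + s)) (c + s) res (t ++ l) = pvGN ds c res l := by
  induction ds generalizing c res with
  | nil => simp [pvGN]
  | cons d dd ih =>
    rw [List.map_cons, pvGN, pvGN]
    have h1 : (t ++ l).drop (c + s) = l.drop c := by
      rw [List.drop_append]
      rw [List.drop_eq_nil_of_le (by omega), show c + s - t.length = c by omega, List.nil_append]
    have h2 : d + s - (c + s) = d - c := by omega
    rw [h1, h2, show d + s + 1 = (d + 1) + s by omega, ih]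

-- the main invariant: B's sliced groups equal pvF with pending prefix pre
theorem pvGN_groups (l : List String) (pre : List String) (res : List (List String)) :
    pvGN ((pvDN l).map (· + pre.length)) 0 res (pre ++ l) = res ++ pvF pre l := by
  induction l generalizing pre res with
  | nil => simp [pvDN, pvGN, pvF]
  | cons x xs ih =>
    by_cases hx : x = ""
    · subst hx
      rw [show pvDN ("" :: xs) = 0 :: (pvDN xs).map (· + 1) by simp [pvDN]]
      rw [List.map_cons, pvGN]
      simp only [Nat.zero_add, List.drop_zero, Nat.sub_zero]
      rw [show (pre ++ "" :: xs).take pre.length = pre by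
        rw [List.take_append_of_le_length (le_refl _), List.take_length]]
      rw [show pvF pre ("" :: xs) = (if pre = [] then [] else [pre]) ++ pvF [] xs by
        simp [pvF]]
      rw [List.map_map,
        show ((· + pre.length) ∘ (· + 1) : Nat → Nat) = (· + (pre.length + 1)) from
          funext fun n => by simp; omega]
      have hshift := pvGN_shift (pvDN xs) 0 (pre.length + 1)
        (if ¬pre = [] then res ++ [pre] else res) (pre ++ [""]) xs (by simp)
      simp only [Nat.zero_add, List.append_assoc, List.singleton_append] at hshift
      rw [hshift]
      have h0 : ((pvDN xs).map (· + 0)) = pvDN xs := by simp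
      have hih := ih (pre := []) (res := if ¬pre = [] then res ++ [pre] else res)
      simp only [List.length_nil, h0, List.nil_append] at hih
      rw [hih]
      by_cases hpre : pre = [] <;> simp [hpre]
    · rw [show pvDN (x :: xs) = (pvDN xs).map (· + 1) by simp [pvDN, hx]]
      rw [List.map_map,
        show ((· + pre.length) ∘ (· + 1) : Nat → Nat) = (· + (pre ++ [x]).length) from
          funext fun n => by simp; omega]
      rw [show pre ++ x :: xs = (pre ++ [x]) ++ xs by simp, ih (pre ++ [x]) res]
      rw [show pvF pre (x :: xs) = pvF (pre ++ [x]) xs by simp [pvF, hx]]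

-- ===== VERDICT (by name: the statement is the Claim_ definition above) =====
theorem get_sayers_of_all_dialogs_spec : Claim_equal_get_sayers_of_all_dialogs := by
  intro sayers _
  unfold Spec_get_sayers_of_all_dialogs get_sayers_of_all_dialogs get_sayers_of_all_dialogs_alt pvDelims
  rw [pvA_loop, pvDelims_eq sayers 0]
  rw [show ((pvDN sayers).map (fun (n : Nat) => ((n : Int) + 0))) = (pvDN sayers).map (Nat.cast : Nat → Int)
    from List.map_congr_left fun n _ => by ring]
  rw [show (0 : Int) = (((0 : Nat) : Nat) : Int) by norm_num, pvGroups_eq_pvGN]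
  have := pvGN_groups sayers [] []
  simpa using this.symm
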